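-- pv_equiv track=rewrite | github.com/Lab-RoCoCo-Sapienza/context-matters | src/context-matters/utils.py | get_verbose_scene_graph
-- ===== SOURCE A (Python) =====
-- from typing import Dict, Set, Optional
-- from collections import defaultdict
-- from collections import defaultdict
-- from typing import Dict
--
-- def get_verbose_scene_graph(graph: Dict, as_string=True) -> str:
--     """
--     Given a 3DSG, return a verbose description of the scene graph with meaningful information,
--     including room names, objects, and their descriptions.
--
--     :param graph: Dictionary containing the 3DSG
--     :return: String with the verbose scene graph
--     """
--
--     rooms = graph.get("room", {})
--     objects = graph.get("object", {})
--
--     # 1. Create a label for each room: always append "_roomId".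
--     room_id_to_label = {
--         r_id: f"{room_info.get('scene_category', 'UnnamedRoom')}_{r_id}"
--         for r_id, room_info in rooms.items()
--     }
--
--     # 2. Create a label for each object: always append "_objId".
--     obj_id_to_label = {
--         o_id: f"{obj_info.get('class_', 'UnnamedObject')}_{o_id}"
--         for o_id, obj_info in objects.items()
--     }
--
--     # 3. Group objects by their roomId.
--     room_to_objects = defaultdict(list)
--     for o_id, obj_info in objects.items():
--         r_id = obj_info.get('parent_room')
--         if r_id in rooms:
--             obj_label = obj_id_to_label[o_id].replace("  "," ").replace(" ", "_")
--             obj_description = obj_info.get('description', 'No description available')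
--             room_to_objects[r_id].append((obj_label, obj_description))
--
--     # 4. Construct the output string.
--     if as_string:
--         lines = []
--         for r_id in rooms:
--             room_label = room_id_to_label[r_id]
--             objs_in_room = room_to_objects.get(r_id, [])
--             obj_lines = []
--             if objs_in_room:
--                 for obj in objs_in_room:
--                     object_name = obj[0].replace(" ", "_")
--                     object_description = obj[1]
--                     obj_lines.append(f"{object_name} - {object_description}")
--
--                 objs_str = "\n  - " + "\n  - ".join(obj_lines)
--             else:
--                 objs_str = "  - No objects"
--             lines.append(f"\n\n{room_label}:{objs_str}")
--
--         return "\n".join(lines)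
--     else:
--         output = {}
--         for r_id in rooms:
--             room_label = room_id_to_label[r_id]
--             objs_in_room = room_to_objects.get(r_id, [])
--             output[room_label] = objs_in_room
--         return output
-- ===== SOURCE B (Python) =====
-- def get_verbose_scene_graph(graph, as_string=True):
--     """Per-room nested scan: no label dicts, no grouping pass; lines emitted directly."""
--     rooms = graph.get("room", {})
--     objects = graph.get("object", {})
--
--     def room_label(r_id, room_info):
--         return f"{room_info.get('scene_category', 'UnnamedRoom')}_{r_id}"
--
--     def objs_in(r_id):
--         return [
--             (f"{info.get('class_', 'UnnamedObject')}_{o_id}".replace("  ", " ").replace(" ", "_"),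
--              info.get('description', 'No description available'))
--             for o_id, info in objects.items()
--             if info.get('parent_room') == r_id
--         ]
--
--     if as_string:
--         chunks = []
--         for r_id, room_info in rooms.items():
--             pairs = objs_in(r_id)
--             if pairs:
--                 body = "".join(f"\n  - {lbl} - {desc}" for lbl, desc in pairs)
--             else:
--                 body = "  - No objects"
--             chunks.append(f"\n\n{room_label(r_id, room_info)}:{body}")
--         return "\n".join(chunks)
--     else:
--         return {room_label(r_id, room_info): objs_in(r_id)
--                 for r_id, room_info in rooms.items()}
-- ===== Notes on version B (the rewrite author's own statement) =====
-- stated objective: alternative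
-- what changed: B drops A's label-dict and grouping-defaultdict passes entirely: for each room it re-scans objects.items() once, computing each object's label/description inline and emitting every object line as one '\n - '-prefixed chunk joined by ''.join, instead of looking up precomputed dicts and joining with a separator.
import Mathlib
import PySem

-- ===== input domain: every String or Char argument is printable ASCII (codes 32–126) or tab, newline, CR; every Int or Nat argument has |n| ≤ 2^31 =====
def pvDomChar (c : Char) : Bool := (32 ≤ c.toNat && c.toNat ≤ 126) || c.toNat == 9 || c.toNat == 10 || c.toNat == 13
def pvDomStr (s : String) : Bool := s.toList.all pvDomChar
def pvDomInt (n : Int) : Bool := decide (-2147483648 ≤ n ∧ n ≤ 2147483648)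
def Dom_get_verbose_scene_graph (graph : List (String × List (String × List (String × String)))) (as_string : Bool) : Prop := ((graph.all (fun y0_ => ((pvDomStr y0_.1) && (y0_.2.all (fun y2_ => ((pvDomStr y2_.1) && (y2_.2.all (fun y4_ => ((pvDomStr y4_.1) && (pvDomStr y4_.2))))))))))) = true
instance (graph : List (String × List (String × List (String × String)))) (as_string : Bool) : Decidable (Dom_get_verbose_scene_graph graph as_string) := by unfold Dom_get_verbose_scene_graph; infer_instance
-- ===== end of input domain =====

-- B drops A's label-dict and grouping-dict passes and instead re-scans the objects once per room,
-- emitting each object line as one "\n  - "-prefixed chunk (objective: alternative decomposition).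
-- Both programs only read their arguments; equivalence is about the return value (neither mutates).

-- ===== PORT A =====
-- step of A's grouping loop (step 3. of the Python)
def pvGroupStep (rooms : List (String × List (String × String)))
    (obj_id_to_label : PySem.Dict String String)
    (d : PySem.Dict String (List (String × String)))
    (p : String × List (String × String)) : PySem.Dict String (List (String × String)) :=
  match (PySem.Dict.mk p.2).get? "parent_room" with
  | some r =>
      if (PySem.Dict.mk rooms).contains r then
        d.modify r [] (· ++ [(PySem.Str.replace (PySem.Str.replace (obj_id_to_label.getD p.1 "") "  " " ") " " "_",
                              (PySem.Dict.mk p.2).getD "description" "No description available")])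
      else d
  | none => d

def get_verbose_scene_graph (graph : List (String × List (String × List (String × String)))) (as_string : Bool) : String :=
  let rooms := (PySem.Dict.mk graph).getD "room" []
  let objects := (PySem.Dict.mk graph).getD "object" []
  let room_id_to_label : PySem.Dict String String :=
    rooms.foldl (fun d p => d.insert p.1 ((PySem.Dict.mk p.2).getD "scene_category" "UnnamedRoom" ++ "_" ++ p.1)) PySem.Dict.empty
  let obj_id_to_label : PySem.Dict String String :=
    objects.foldl (fun d p => d.insert p.1 ((PySem.Dict.mk p.2).getD "class_" "UnnamedObject" ++ "_" ++ p.1)) PySem.Dict.empty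
  let room_to_objects := objects.foldl (pvGroupStep rooms obj_id_to_label) PySem.Dict.empty
  if as_string then
    let lines := rooms.foldl (fun acc r =>
      let room_label := room_id_to_label.getD r.1 ""
      let objs_in_room := room_to_objects.getD r.1 []
      let objs_str :=
        if !objs_in_room.isEmpty then
          "\n  - " ++ PySem.Str.join "\n  - "
            (objs_in_room.foldl (fun ls o => ls ++ [PySem.Str.replace o.1 " " "_" ++ " - " ++ o.2]) [])
        else "  - No objects"
      acc ++ ["\n\n" ++ room_label ++ ":" ++ objs_str]) []
    PySem.Str.join "\n" lines
  else "" -- Python returns a dict (not a str) here; as_string = false is outside Pre_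

-- ===== PORT B =====
-- the (label, description) pair B computes for one object entry
def pvObjPair (p : String × List (String × String)) : String × String :=
  (PySem.Str.replace (PySem.Str.replace ((PySem.Dict.mk p.2).getD "class_" "UnnamedObject" ++ "_" ++ p.1) "  " " ") " " "_",
   (PySem.Dict.mk p.2).getD "description" "No description available")

def get_verbose_scene_graph_alt (graph : List (String × List (String × List (String × String)))) (as_string : Bool) : String :=
  let rooms := (PySem.Dict.mk graph).getD "room" []
  let objects := (PySem.Dict.mk graph).getD "object" []
  if as_string then
    let chunks := rooms.foldl (fun acc r =>
      let pairs := (objects.filter (fun p => (PySem.Dict.mk p.2).get? "parent_room" == some r.1)).map pvObjPair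
      let body :=
        if !pairs.isEmpty then PySem.Str.join "" (pairs.map (fun q => "\n  - " ++ q.1 ++ " - " ++ q.2))
        else "  - No objects"
      acc ++ ["\n\n" ++ ((PySem.Dict.mk r.2).getD "scene_category" "UnnamedRoom" ++ "_" ++ r.1) ++ ":" ++ body]) []
    PySem.Str.join "\n" chunks
  else "" -- Python returns a dict (not a str) here; as_string = false is outside Pre_

-- ===== PRECONDITION & SPEC =====
-- Pre_ excludes as_string = false, where the Python returns a dict and not a value of the declared
-- str type, and association lists whose room/object 'dict' carries duplicate ids, which a Python
-- dict cannot represent (its key collapse is accidental).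
def Pre_get_verbose_scene_graph (graph : List (String × List (String × List (String × String)))) (as_string : Bool) : Prop :=
  as_string = true ∧
  (((PySem.Dict.mk graph).getD "room" []).map Prod.fst).Nodup ∧
  (((PySem.Dict.mk graph).getD "object" []).map Prod.fst).Nodup
instance (graph : List (String × List (String × List (String × String)))) (as_string : Bool) : Decidable (Pre_get_verbose_scene_graph graph as_string) := by unfold Pre_get_verbose_scene_graph; infer_instance

def pvWitness_get_verbose_scene_graph : (List (String × List (String × List (String × String)))) × Bool :=
  ([("room", [("r1", [("scene_category", "kitchen")])]),
    ("object", [("o1", [("class_", "mug"), ("parent_room", "r1")])])], true)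

def Spec_get_verbose_scene_graph (graph : List (String × List (String × List (String × String)))) (as_string : Bool) (out : String) : Prop := out = get_verbose_scene_graph_alt graph as_string
instance (graph : List (String × List (String × List (String × String)))) (as_string : Bool) (out : String) : Decidable (Spec_get_verbose_scene_graph graph as_string out) := by unfold Spec_get_verbose_scene_graph; infer_instance

-- ===== CLAIM (what is proved, stated in full; the proofs are below) =====
def Claim_equal_get_verbose_scene_graph : Prop := ∀ (graph : List (String × List (String × List (String × String)))) (as_string : Bool), Dom_get_verbose_scene_graph graph as_string → Pre_get_verbose_scene_graph graph as_string → Spec_get_verbose_scene_graph graph as_string (get_verbose_scene_graph graph as_string)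

-- ===== LEMMAS AND PROOFS =====

-- A dict built by inserting distinct fresh keys, looked up at one of them
theorem pv_getD_label_dict {β γ : Type} (l : List (String × β)) (f : (String × β) → γ)
    (dflt : γ) (p : String × β) (hp : p ∈ l) (hn : (l.map Prod.fst).Nodup) :
    ((l.foldl (fun d x => d.insert x.1 (f x)) PySem.Dict.empty).getD p.1 dflt) = f p := by
  have hitems := PySem.Dict.items_foldl_insert_fresh (l := l) (k := Prod.fst) (v := f)
      (d := PySem.Dict.empty) (fun a _ => by simp) (by simpa using hn)
  have hkeys : ((l.foldl (fun d x => d.insert x.1 (f x)) PySem.Dict.empty).keys).Nodup := by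
    unfold PySem.Dict.keys
    rw [hitems]
    simpa [Function.comp] using hn
  exact PySem.Dict.getD_of_mem_items _
    (by rw [hitems]
        refine List.mem_append.mpr (Or.inr ?_)
        exact List.mem_map_of_mem (f := fun a => (a.1, f a)) hp) hkeys dflt

-- A's grouping fold, read back at a room key
theorem pv_group_getD (rooms : List (String × List (String × String)))
    (labels : PySem.Dict String String)
    (objects : List (String × List (String × String)))
    (d : PySem.Dict String (List (String × String))) (r : String)
    (hr : (PySem.Dict.mk rooms).contains r = true) :
    (objects.foldl (pvGroupStep rooms labels) d).getD r []
      = d.getD r [] ++ (objects.filter (fun p => (PySem.Dict.mk p.2).get? "parent_room" == some r)).map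
          (fun p => (PySem.Str.replace (PySem.Str.replace (labels.getD p.1 "") "  " " ") " " "_",
                     (PySem.Dict.mk p.2).getD "description" "No description available")) := by
  induction objects generalizing d with
  | nil => simp
  | cons p t ih =>
    simp only [List.foldl_cons, List.filter_cons]
    cases hpr : (PySem.Dict.mk p.2).get? "parent_room" with
    | none =>
      have hstep : pvGroupStep rooms labels d p = d := by
        unfold pvGroupStep; rw [hpr]
      rw [hstep, ih]
      simp
    | some r' =>
      have hstep : pvGroupStep rooms labels d p =
          if (PySem.Dict.mk rooms).contains r' then
            d.modify r' [] (· ++ [(PySem.Str.replace (PySem.Str.replace (labels.getD p.1 "") "  " " ") " " "_",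
                                   (PySem.Dict.mk p.2).getD "description" "No description available")])
          else d := by
        unfold pvGroupStep; rw [hpr]
      rw [hstep]
      by_cases hrr : r' = r
      · subst hrr
        rw [if_pos hr, ih, PySem.Dict.getD_modify_self]
        simp
      · have hne : ((PySem.Dict.mk p.2).get? "parent_room" == some r) = false := by
          simp [hpr, hrr]
        by_cases hc : (PySem.Dict.mk rooms).contains r' = true
        · rw [if_pos hc, ih, PySem.Dict.getD_modify_of_ne _ _ _ (fun h => hrr h.symm)]
          simp [hrr]
        · rw [if_neg hc, ih]
          simp [hrr]

-- unfolding equations of PySem.Chars.replace.go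
theorem pv_go_zero (old new : List Char) (l acc : List Char) :
    PySem.Chars.replace.go old new 0 l acc = acc.reverse ++ l := by
  rw [PySem.Chars.replace.go]

theorem pv_go_succ_nil (old new : List Char) (n : Nat) (acc : List Char) :
    PySem.Chars.replace.go old new (n + 1) [] acc = acc.reverse := by
  rw [PySem.Chars.replace.go]
  intro h
  omega

theorem pv_go_succ_cons (old new : List Char) (n : Nat) (c : Char) (t acc : List Char) :
    PySem.Chars.replace.go old new (n + 1) (c :: t) acc =
      if old.isPrefixOf (c :: t) then
        PySem.Chars.replace.go old new n (List.drop old.length (c :: t)) (new.reverse ++ acc)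
      else PySem.Chars.replace.go old new n t (c :: acc) := by
  rw [PySem.Chars.replace.go]

-- replace.go never replaces when the single-char pattern is absent
theorem pv_go_of_not_mem (c : Char) (new : List Char) (fuel : Nat) (l acc : List Char)
    (h : c ∉ l) : PySem.Chars.replace.go [c] new fuel l acc = acc.reverse ++ l := by
  induction fuel generalizing l acc with
  | zero => exact pv_go_zero _ _ _ _
  | succ n ih =>
    cases l with
    | nil => simpa using pv_go_succ_nil [c] new n acc
    | cons x t =>
      have hx : x ≠ c := fun hxc => h (by simp [hxc])
      have hpre : [c].isPrefixOf (x :: t) = false := by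
        simp [List.isPrefixOf, Ne.symm hx]
      rw [pv_go_succ_cons, hpre]
      simp only [Bool.false_eq_true, if_false]
      rw [ih t (x :: acc) (fun ht => h (by simp [ht]))]
      simp

-- the output of replace.go with new = ['_'] contains no space (given enough fuel)
theorem pv_go_no_space (fuel : Nat) (l acc : List Char)
    (hf : l.length ≤ fuel) (hacc : ' ' ∉ acc) :
    ' ' ∉ PySem.Chars.replace.go [' '] ['_'] fuel l acc := by
  induction fuel generalizing l acc with
  | zero =>
    have : l = [] := List.eq_nil_of_length_eq_zero (Nat.le_zero.mp hf)
    subst this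
    rw [pv_go_zero]
    simpa using hacc
  | succ n ih =>
    cases l with
    | nil =>
      rw [pv_go_succ_nil]
      simpa using hacc
    | cons x t =>
      rw [pv_go_succ_cons]
      by_cases hx : x = ' '
      · subst hx
        have hpre : [' '].isPrefixOf (' ' :: t) = true := by simp [List.isPrefixOf]
        rw [hpre]
        simp only [if_pos]
        refine ih _ _ ?_ (by simpa using hacc)
        simp only [List.length_cons, List.length_nil, Nat.zero_add, List.drop_succ_cons,
          List.drop_zero] at hf ⊢
        omega
      · have hpre : [' '].isPrefixOf (x :: t) = false := by
          simp [List.isPrefixOf, Ne.symm hx]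
        rw [hpre]
        simp only [Bool.false_eq_true, if_false]
        exact ih t (x :: acc) (by simpa using Nat.succ_le_succ_iff.mp hf)
          (by simp [hacc, Ne.symm hx])

-- replacing a single absent character changes nothing
theorem pv_chars_replace_of_not_mem (c : Char) (new : List Char) (l : List Char) (h : c ∉ l) :
    PySem.Chars.replace l [c] new = l := by
  unfold PySem.Chars.replace
  simp only [List.isEmpty_cons, Bool.false_eq_true, if_false]
  simpa using pv_go_of_not_mem c new l.length l [] h

-- the result of replacing " " by "_" contains no space
theorem pv_chars_no_space (l : List Char) : ' ' ∉ PySem.Chars.replace l [' '] ['_'] := by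
  unfold PySem.Chars.replace
  simp only [List.isEmpty_cons, Bool.false_eq_true, if_false]
  exact pv_go_no_space _ _ _ le_rfl (by simp)

-- replacing " " by "_" twice is the same as once
theorem pv_replace_idem (s : String) :
    PySem.Str.replace (PySem.Str.replace s " " "_") " " "_" = PySem.Str.replace s " " "_" := by
  unfold PySem.Str.replace
  congr 1
  rw [show (String.ofList (PySem.Chars.replace s.toList " ".toList "_".toList)).toList
        = PySem.Chars.replace s.toList " ".toList "_".toList by simp]
  rw [show (" " : String).toList = [' '] from rfl, show ("_" : String).toList = ['_'] from rfl]
  exact pv_chars_replace_of_not_mem ' ' ['_'] _ (pv_chars_no_space _)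

-- sep ++ sep.join(l)  =  "".join(sep ++ x for x in l), for nonempty l (on char lists)
theorem pv_chars_join_prepend (sep : List Char) (l : List (List Char)) (h : l ≠ []) :
    sep ++ PySem.Chars.join sep l = PySem.Chars.join [] (l.map (fun x => sep ++ x)) := by
  induction l with
  | nil => exact absurd rfl h
  | cons x t ih =>
    cases t with
    | nil => simp [PySem.Chars.join, List.intercalate]
    | cons y u =>
      have h1 : PySem.Chars.join sep (x :: y :: u) = x ++ sep ++ PySem.Chars.join sep (y :: u) :=
        PySem.Chars.join_cons_cons sep x y u
      have h2 : PySem.Chars.join [] ((x :: y :: u).map (fun z => sep ++ z))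
          = (sep ++ x) ++ [] ++ PySem.Chars.join [] ((y :: u).map (fun z => sep ++ z)) := by
        simpa using PySem.Chars.join_cons_cons [] (sep ++ x) (sep ++ y) (u.map (fun z => sep ++ z))
      rw [h1, h2, ← ih (by simp)]
      simp

-- the same on strings
theorem pv_str_join_prepend (sep : String) (l : List String) (h : l ≠ []) :
    sep ++ PySem.Str.join sep l = PySem.Str.join "" (l.map (fun x => sep ++ x)) := by
  apply String.toList_inj.mp
  simp only [String.toList_append, PySem.Str.toList_join, List.map_map]
  rw [pv_chars_join_prepend sep.toList (l.map String.toList) (by simpa using h)]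
  simp [List.map_map, Function.comp_def]

-- ===== VERDICT (by name: the statement is the Claim_ definition above) =====
theorem get_verbose_scene_graph_spec : Claim_equal_get_verbose_scene_graph := by
  intro graph as_string _hdom hpre
  obtain ⟨hb, hnr, hno⟩ := hpre
  subst hb
  unfold Spec_get_verbose_scene_graph
  simp only [get_verbose_scene_graph, get_verbose_scene_graph_alt, if_true]
  congr 1
  rw [PySem.List.foldl_append_singleton_eq_map, PySem.List.foldl_append_singleton_eq_map,
    List.nil_append, List.nil_append]
  apply List.map_congr_left
  intro r hr
  have hrlab := pv_getD_label_dict ((PySem.Dict.mk graph).getD "room" [])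
    (fun p => (PySem.Dict.mk p.2).getD "scene_category" "UnnamedRoom" ++ "_" ++ p.1) "" r hr hnr
  rw [hrlab]
  have hcontains : (PySem.Dict.mk ((PySem.Dict.mk graph).getD "room" [])).contains r.1 = true := by
    rw [PySem.Dict.contains_iff_mem_keys]
    simpa using List.mem_map_of_mem (f := Prod.fst) hr
  rw [pv_group_getD _ _ _ _ _ hcontains]
  simp only [PySem.Dict.getD_empty, List.nil_append]
  have hmap : List.map
        (fun p => (PySem.Str.replace (PySem.Str.replace
            ((((PySem.Dict.mk graph).getD "object" []).foldl
              (fun d p => d.insert p.1 ((PySem.Dict.mk p.2).getD "class_" "UnnamedObject" ++ "_" ++ p.1))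
              PySem.Dict.empty).getD p.1 "") "  " " ") " " "_",
          (PySem.Dict.mk p.2).getD "description" "No description available"))
        (((PySem.Dict.mk graph).getD "object" []).filter
          (fun p => (PySem.Dict.mk p.2).get? "parent_room" == some r.1))
      = List.map pvObjPair
        (((PySem.Dict.mk graph).getD "object" []).filter
          (fun p => (PySem.Dict.mk p.2).get? "parent_room" == some r.1)) := by
    apply List.map_congr_left
    intro p hp
    have := pv_getD_label_dict ((PySem.Dict.mk graph).getD "object" [])
      (fun p => (PySem.Dict.mk p.2).getD "class_" "UnnamedObject" ++ "_" ++ p.1) "" p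
      (List.mem_of_mem_filter hp) hno
    rw [this, pvObjPair]
  rw [hmap]
  by_cases hpemp : List.map pvObjPair
      (((PySem.Dict.mk graph).getD "object" []).filter
        (fun p => (PySem.Dict.mk p.2).get? "parent_room" == some r.1)) = []
  · rw [hpemp]
    simp
  · rw [if_pos (by simpa [List.isEmpty_iff] using hpemp),
      if_pos (by simpa [List.isEmpty_iff] using hpemp)]
    congr 1
    rw [PySem.List.foldl_append_singleton_eq_map
      (fun o : String × String => PySem.Str.replace o.1 " " "_" ++ " - " ++ o.2), List.nil_append]
    have hidem : List.map (fun o => PySem.Str.replace o.1 " " "_" ++ " - " ++ o.2)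
          (List.map pvObjPair (((PySem.Dict.mk graph).getD "object" []).filter
            (fun p => (PySem.Dict.mk p.2).get? "parent_room" == some r.1)))
        = List.map (fun q => q.1 ++ " - " ++ q.2)
          (List.map pvObjPair (((PySem.Dict.mk graph).getD "object" []).filter
            (fun p => (PySem.Dict.mk p.2).get? "parent_room" == some r.1))) := by
      apply List.map_congr_left
      intro o ho
      obtain ⟨p, hp', rfl⟩ := List.mem_map.mp ho
      simp only [pvObjPair]
      rw [pv_replace_idem]
    rw [hidem, pv_str_join_prepend _ _ (by simpa using hpemp), List.map_map]
    apply congrArg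
    apply List.map_congr_left
    intro q hq
    simp [String.append_assoc]
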